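-- pv_equiv track=rewrite | github.com/itsjaboyd/practical-scripting | Obsidian/properties.py | get_property_delimeter_indeces
-- ===== SOURCE A (Python) =====
-- PROPERTY_DELIMETER = "---\n"
--
-- def has_property(read_lines):
--     count = 0
--     for line in read_lines:
--         count = count + 1 if line == PROPERTY_DELIMETER else count
--     return True if count == 2 else False
--
-- def get_property_delimeter_indeces(read_lines):
--     if not has_property(read_lines):
--         return None, None
--     first, second = None, None
--     for index in range(len(read_lines)):
--         if read_lines[index] == PROPERTY_DELIMETER:
--             first = index if first is None else first
--             second = index if first is not None else second
--     return first, second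
-- ===== SOURCE B (Python) =====
-- PROPERTY_DELIMETER = "---\n"
--
-- def get_property_delimeter_indeces(read_lines):
--     idxs = [i for i, line in enumerate(read_lines) if line == PROPERTY_DELIMETER]
--     if len(idxs) != 2:
--         return None, None
--     return idxs[0], idxs[1]
-- ===== Notes on version B (the rewrite author's own statement) =====
-- stated objective: simpler
-- what changed: B builds the list of delimiter-line indices in one enumerate pass and returns its two elements when there are exactly two, replacing A's separate counting pass (has_property) plus a second index loop with conditional reassignments.
import Mathlib
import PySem

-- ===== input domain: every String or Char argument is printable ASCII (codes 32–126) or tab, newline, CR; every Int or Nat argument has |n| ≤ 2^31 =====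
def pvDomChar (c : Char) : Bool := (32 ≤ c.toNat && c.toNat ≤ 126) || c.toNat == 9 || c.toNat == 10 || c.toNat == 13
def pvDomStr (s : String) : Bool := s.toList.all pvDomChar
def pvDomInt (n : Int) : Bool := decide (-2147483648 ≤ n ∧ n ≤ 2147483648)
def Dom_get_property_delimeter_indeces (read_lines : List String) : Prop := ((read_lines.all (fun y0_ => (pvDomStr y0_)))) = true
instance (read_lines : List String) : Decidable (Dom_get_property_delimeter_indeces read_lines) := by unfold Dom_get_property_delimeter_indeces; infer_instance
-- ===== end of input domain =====

-- B replaces A's two passes (count delimiters, then rescan for first/second) with one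
-- enumerate pass building the delimiter-index list; same return value, simpler decomposition.


-- ===== PORT A =====
def pvDelim : String := "---\n"

-- port of has_property: count delimiter lines, True iff count == 2
def has_property (read_lines : List String) : Bool :=
  let count := read_lines.foldl (fun c line => if line = pvDelim then c + 1 else c) (0 : Int)
  if count = 2 then true else false

-- port of A's index loop: fold over range(len(read_lines)) updating (first, second)
def pvLoopA (read_lines : List String) : Option Int × Option Int :=
  (PySem.List.pyRange 0 (PySem.List.len read_lines) 1).foldl
    (fun (st : Option Int × Option Int) index =>
      if PySem.List.pyGetD read_lines index "" = pvDelim then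
        let first := if st.1 = none then some index else st.1
        let second := if first ≠ none then some index else st.2
        (first, second)
      else st)
    (none, none)

def get_property_delimeter_indeces (read_lines : List String) : Option Int × Option Int :=
  if ¬ has_property read_lines then (none, none)
  else pvLoopA read_lines

-- ===== PORT B =====
-- one pass: indices of delimiter lines; exactly two → return them, else (none, none)
def get_property_delimeter_indeces_alt (read_lines : List String) : Option Int × Option Int :=
  let idxs := (PySem.List.enumerate read_lines).filterMap
    (fun p => if p.2 = pvDelim then some p.1 else none)
  match idxs with
  | [i, j] => (some i, some j)
  | _ => (none, none)

-- ===== PRECONDITION & SPEC =====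
def Spec_get_property_delimeter_indeces (read_lines : List String) (out : Option Int × Option Int) : Prop := out = get_property_delimeter_indeces_alt read_lines
instance (read_lines : List String) (out : Option Int × Option Int) : Decidable (Spec_get_property_delimeter_indeces read_lines out) := by unfold Spec_get_property_delimeter_indeces; infer_instance

-- ===== CLAIM (what is proved, stated in full; the proofs are below) =====
def Claim_equal_get_property_delimeter_indeces : Prop := ∀ (read_lines : List String), Dom_get_property_delimeter_indeces read_lines → Spec_get_property_delimeter_indeces read_lines (get_property_delimeter_indeces read_lines)

-- ===== LEMMAS AND PROOFS =====

-- the loop body of A's index loop, seen as a function on (index, line) pairs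
def pvF (st : Option Int × Option Int) (p : Int × String) : Option Int × Option Int :=
  if p.2 = pvDelim then
    let first := if st.1 = none then some p.1 else st.1
    let second := if first ≠ none then some p.1 else st.2
    (first, second)
  else st

-- the delimiter-index list B builds, over an arbitrary (index, line) list
def pvJ (l : List (Int × String)) : List Int :=
  l.filterMap (fun p => if p.2 = pvDelim then some p.1 else none)

theorem pvJ_cons (p : Int × String) (l : List (Int × String)) :
    pvJ (p :: l) = if p.2 = pvDelim then p.1 :: pvJ l else pvJ l := by
  by_cases h : p.2 = pvDelim <;> simp [pvJ, h]

theorem getLast?_cons_or {α : Type} (x : α) (t : List α) :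
    (x :: t).getLast? = t.getLast?.or (some x) := by
  cases t with
  | nil => rfl
  | cons y t =>
    rw [List.getLast?_cons_cons]
    have h : (y :: t).getLast?.isSome := by simp [List.getLast?_isSome]
    cases ho : (y :: t).getLast? with
    | none => simp [ho] at h
    | some v => simp

theorem loopA_enum (xs : List String) :
    pvLoopA xs = (PySem.List.enumerate xs).foldl pvF (none, none) := by
  unfold pvLoopA
  rw [PySem.List.enumerate_eq_map_pyRange xs "", List.foldl_map]
  rfl

theorem fold_some (l : List (Int × String)) (a : Int) (s2 : Option Int) :
    l.foldl pvF (some a, s2) = (some a, (pvJ l).getLast?.or s2) := by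
  induction l generalizing s2 with
  | nil => simp [pvJ]
  | cons p l ih =>
    by_cases h : p.2 = pvDelim
    · simp [pvF, h, ih, pvJ_cons, getLast?_cons_or]
    · simp [pvF, h, ih, pvJ_cons]

theorem fold_none (l : List (Int × String)) (s2 : Option Int) :
    l.foldl pvF (none, s2) =
      match pvJ l with
      | [] => (none, s2)
      | j :: rest => (some j, ((j :: rest).getLast?).or s2) := by
  induction l generalizing s2 with
  | nil => simp [pvJ]
  | cons p l ih =>
    by_cases h : p.2 = pvDelim
    · simp only [List.foldl_cons, pvF, h, if_pos, pvJ_cons]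
      simp only [reduceIte, ne_eq, Option.some_ne_none, not_false_eq_true]
      rw [fold_some]
      simp [getLast?_cons_or]
    · simp only [List.foldl_cons, pvF, h, pvJ_cons, if_false, reduceIte]
      exact ih s2

theorem count_eq (xs : List String) : ∀ (s c : Int),
    xs.foldl (fun c line => if line = pvDelim then c + 1 else c) c
      = c + ((pvJ (PySem.List.enumerate xs s)).length : Int) := by
  induction xs with
  | nil => intro s c; simp [PySem.List.enumerate, pvJ]
  | cons x xs ih =>
    intro s c
    by_cases h : x = pvDelim
    · simp [PySem.List.enumerate_cons, pvJ_cons, h, ih (s + 1)]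
      ring
    · simp [PySem.List.enumerate_cons, pvJ_cons, h, ih (s + 1)]

-- ===== VERDICT (by name: the statement is the Claim_ definition above) =====
theorem get_property_delimeter_indeces_spec : Claim_equal_get_property_delimeter_indeces := by
  intro xs _
  unfold Spec_get_property_delimeter_indeces get_property_delimeter_indeces
    get_property_delimeter_indeces_alt has_property
  rw [loopA_enum]
  have hc := count_eq xs 0 0
  simp only [zero_add] at hc
  rw [hc, fold_none]
  rcases hJ : pvJ (PySem.List.enumerate xs) with _ | ⟨i, _ | ⟨j, rest⟩⟩
  · simp only [pvJ] at hJ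
    simp [hJ]
  · simp only [pvJ] at hJ
    simp [hJ]
  · cases rest with
    | nil =>
      simp only [pvJ] at hJ
      simp [hJ]
    | cons k rest =>
      simp only [pvJ] at hJ
      simp [hJ]
      omega
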